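-- pv_equiv track=rewrite | github.com/yanndanielou/yanndan-programmation | Python/ShutTheBox/src/shutthebox/combinations_to_reach_sum.py | get_all_unique_combinations_to_reach_exactly_sum_using_element_no_more_than_once
-- ===== SOURCE A (Python) =====
-- def get_all_unique_combinations_to_reach_exactly_sum_using_element_no_more_than_once(elements: list[int], sum_to_attain: int) -> list[list[int]]:
--
--     def backtrack(reste: int, index: int, chemin: list) -> None:
--         # Si la somme restante est atteinte, ajouter la combinaison
--         if reste == 0:
--             results.append(list(chemin))
--             return
--         # Si la somme restante est négative ou plus d'éléments, arrêter
--         if reste < 0: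
--             return
--
--         for i in range(index, len(elements)):
--             # Ajouter le nombre actuel au chemin
--             chemin.append(elements[i])
--             # Appel récursif avec la somme restante mise à jour et index + 1 (pour éviter les répétitions)
--             backtrack(reste - elements[i], i + 1, chemin)  # Réutiliser l'élément actuel (index = i)
--             # Retirer l'élément ajouté (backtracking)
--             chemin.pop()
--
--     results: list[list[int]] = list()
--
--     backtrack(sum_to_attain, 0, [])
--
--     return results
-- ===== SOURCE B (Python) =====
-- def get_all_unique_combinations_to_reach_exactly_sum_using_element_no_more_than_once(elements: list[int], sum_to_attain: int) -> list[list[int]]: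
--     # Pure structural recursion on the list: no shared mutable path/results,
--     # combinations are built back-to-front by prepending the head.
--     def solve(rest: list[int], target: int) -> list[list[int]]:
--         if target == 0:
--             return [[]]
--         if target < 0 or not rest:
--             return []
--         head = rest[0]
--         tail = rest[1:]
--         return [[head] + combo for combo in solve(tail, target - head)] + solve(tail, target)
--
--     return solve(elements, sum_to_attain)
-- ===== Notes on version B (the rewrite author's own statement) =====
-- stated objective: alternative
-- what changed: Replaces A's mutating index-based backtracking (shared path/results lists, loop over remaining indices with append/recurse/pop) by a pure structural recursion on the list that returns the combinations directly, building each back-to-front by prepending the head to the tail's solutions.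
import Mathlib
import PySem

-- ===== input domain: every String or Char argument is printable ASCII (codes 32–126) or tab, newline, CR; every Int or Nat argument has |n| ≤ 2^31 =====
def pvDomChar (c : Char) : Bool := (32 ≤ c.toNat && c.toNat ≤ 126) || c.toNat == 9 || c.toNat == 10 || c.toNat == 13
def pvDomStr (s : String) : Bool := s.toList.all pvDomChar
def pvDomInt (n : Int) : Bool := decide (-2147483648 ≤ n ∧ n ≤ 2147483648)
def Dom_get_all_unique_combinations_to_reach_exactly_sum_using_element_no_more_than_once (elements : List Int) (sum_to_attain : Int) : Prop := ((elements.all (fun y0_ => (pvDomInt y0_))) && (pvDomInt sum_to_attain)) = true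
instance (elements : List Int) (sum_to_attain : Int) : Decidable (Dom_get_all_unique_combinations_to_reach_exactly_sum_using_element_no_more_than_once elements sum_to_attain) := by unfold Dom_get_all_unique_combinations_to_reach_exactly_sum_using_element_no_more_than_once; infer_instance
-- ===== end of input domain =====

-- B replaces A's mutating index-based backtracking by a pure structural recursion on
-- the list that returns the combinations directly (objective: alternative decomposition).

-- ===== PORT A =====
-- A's `backtrack` (the guards) and its `for i in range(index, len(elements))` loop,
-- as a mutual pair; the Python mutates `results`/`chemin`, modelled here by returning
-- the list of appended combinations in order (A's return value is exactly `results`).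
mutual
def pvBtA (el : List Int) (reste : Int) (index : Nat) (chemin : List Int) : List (List Int) :=
  if reste = 0 then [chemin]
  else if reste < 0 then []
  else pvLoopA el reste index chemin
termination_by (el.length - index, 1)
def pvLoopA (el : List Int) (reste : Int) (i : Nat) (chemin : List Int) : List (List Int) :=
  if i < el.length then
    pvBtA el (reste - el.getD i 0) (i + 1) (chemin ++ [el.getD i 0]) ++
      pvLoopA el reste (i + 1) chemin
  else []
termination_by (el.length - i, 0)
end

def get_all_unique_combinations_to_reach_exactly_sum_using_element_no_more_than_once (elements : List Int) (sum_to_attain : Int) : List (List Int) :=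
  pvBtA elements sum_to_attain 0 []

-- ===== PORT B =====
-- B's `solve`: structural recursion on the list, prepending the head to each
-- solution of the tail; no path accumulator, no index arithmetic.
def pvSolveB (rest : List Int) (target : Int) : List (List Int) :=
  if target = 0 then [[]]
  else if target < 0 then []
  else
    match rest with
    | [] => []
    | head :: tail =>
        ((pvSolveB tail (target - head)).map (fun combo => head :: combo)) ++
          pvSolveB tail target

def get_all_unique_combinations_to_reach_exactly_sum_using_element_no_more_than_once_alt (elements : List Int) (sum_to_attain : Int) : List (List Int) :=
  pvSolveB elements sum_to_attain

-- ===== PRECONDITION & SPEC =====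
def Spec_get_all_unique_combinations_to_reach_exactly_sum_using_element_no_more_than_once (elements : List Int) (sum_to_attain : Int) (out : List (List Int)) : Prop := out = get_all_unique_combinations_to_reach_exactly_sum_using_element_no_more_than_once_alt elements sum_to_attain
instance (elements : List Int) (sum_to_attain : Int) (out : List (List Int)) : Decidable (Spec_get_all_unique_combinations_to_reach_exactly_sum_using_element_no_more_than_once elements sum_to_attain out) := by unfold Spec_get_all_unique_combinations_to_reach_exactly_sum_using_element_no_more_than_once; infer_instance

-- ===== CLAIM (what is proved, stated in full; the proofs are below) =====
def Claim_equal_get_all_unique_combinations_to_reach_exactly_sum_using_element_no_more_than_once : Prop := ∀ (elements : List Int) (sum_to_attain : Int), Dom_get_all_unique_combinations_to_reach_exactly_sum_using_element_no_more_than_once elements sum_to_attain → Spec_get_all_unique_combinations_to_reach_exactly_sum_using_element_no_more_than_once elements sum_to_attain (get_all_unique_combinations_to_reach_exactly_sum_using_element_no_more_than_once elements sum_to_attain)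

-- ===== LEMMAS AND PROOFS =====

-- Invariant: A's backtracking from index i with accumulated path c produces exactly
-- B's solutions for the suffix `el.drop i`, each prefixed with c; proved by strong
-- induction on the number of remaining indices, together with the loop lemma.
theorem pvA_eq_B (el : List Int) :
    ∀ m i, el.length - i ≤ m →
      (∀ r c, ¬ r = 0 → ¬ r < 0 →
        pvLoopA el r i c = (pvSolveB (el.drop i) r).map (fun combo => c ++ combo)) ∧
      (∀ r c, pvBtA el r i c = (pvSolveB (el.drop i) r).map (fun combo => c ++ combo)) := by
  intro m
  induction m with
  | zero =>
    intro i hi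
    have hdrop : el.drop i = [] := List.drop_eq_nil_of_le (by omega)
    constructor
    · intro r c h0 hneg
      rw [pvLoopA, hdrop, pvSolveB]
      simp only [if_neg h0, if_neg hneg]
      rw [if_neg (by omega : ¬ i < el.length)]
      rfl
    · intro r c
      rw [pvBtA, hdrop, pvSolveB.eq_def]
      by_cases h0 : r = 0
      · simp [h0]
      · have hneg' : ¬ r < 0 ∨ r < 0 := em' _
        by_cases hneg : r < 0
        · simp [h0, hneg]
        · simp only [if_neg h0, if_neg hneg]
          rw [pvLoopA, if_neg (by omega : ¬ i < el.length)]
          rfl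
  | succ m ih =>
    intro i hi
    have loopEq : ∀ r c, ¬ r = 0 → ¬ r < 0 →
        pvLoopA el r i c = (pvSolveB (el.drop i) r).map (fun combo => c ++ combo) := by
      intro r c h0 hneg
      rw [pvLoopA, pvSolveB.eq_def]
      simp only [if_neg h0, if_neg hneg]
      by_cases hlt : i < el.length
      · rw [if_pos hlt]
        have hdrop : el.drop i = el.getD i 0 :: el.drop (i + 1) := by
          rw [List.drop_eq_getElem_cons hlt]
          simp [List.getD, List.getElem?_eq_getElem hlt]
        rw [hdrop]
        have ih' := ih (i + 1) (by omega)
        rw [ih'.2, ih'.1 r c h0 hneg]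
        simp [List.map_map, Function.comp]
      · rw [if_neg hlt]
        rw [List.drop_eq_nil_of_le (by omega)]
        rfl
    refine ⟨loopEq, ?_⟩
    intro r c
    rw [pvBtA]
    by_cases h0 : r = 0
    · rw [pvSolveB.eq_def]
      simp [h0]
    · by_cases hneg : r < 0
      · rw [pvSolveB.eq_def]
        simp [h0, hneg]
      · simp only [if_neg h0, if_neg hneg]
        exact loopEq r c h0 hneg

-- ===== VERDICT (by name: the statement is the Claim_ definition above) =====
theorem get_all_unique_combinations_to_reach_exactly_sum_using_element_no_more_than_once_spec : Claim_equal_get_all_unique_combinations_to_reach_exactly_sum_using_element_no_more_than_once := by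
  intro elements sum_to_attain _
  show pvBtA elements sum_to_attain 0 [] = pvSolveB elements sum_to_attain
  have h := (pvA_eq_B elements elements.length 0 (by omega)).2 sum_to_attain []
  simpa using h
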